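-- pv_equiv track=rewrite | github.com/ar90n/lab | contest/atcoder/abc128/D/main.py | solve
-- ===== SOURCE A (Python) =====
-- def solve(N: int, K: int, V: "List[int]"):
--
--     lq = []
--     acc_l = 0
--     acc_ml = []
--     ret = 0
--     for li in range(min(N+1, K + 1)):
--         if 0 < li:
--             acc_l += V[li - 1]
--             if V[li - 1] < 0:
--                 acc_ml.append(V[li - 1])
--
--         if ret < acc_l:
--             ret = acc_l
--         acc_r = 0
--         ms = [v for v in acc_ml]
--         ms.sort()
--         for _ri in range(min(N+1, K + 1) - li):
--             if 0 < _ri: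
--                 ri = N - _ri
--                 acc_r += V[ri]
--                 if V[ri] < 0:
--                     ms.append(V[ri])
--                     ms.sort()
--             ci = min(len(ms), K - li - _ri)
--             acc_c = sum(ms[:ci])
--             acc = acc_l + acc_r - acc_c
--             if ret < acc:
--                 ret = acc
--     return ret
-- ===== SOURCE B (Python) =====
-- def _insort(ms, v):
--     # binary insertion into the sorted list ms (bisect_right by hand; A's module has no imports)
--     lo, hi = 0, len(ms)
--     while lo < hi:
--         mid = (lo + hi) // 2
--         if v < ms[mid]:
--             hi = mid
--         else:
--             lo = mid + 1
--     ms.insert(lo, v)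
--     return lo
--
--
-- def solve(N: int, K: int, V: "List[int]"):
--     t = min(N, K)
--     if t < 0:
--         return 0
--     best = 0
--     sum_l = 0
--     left = []          # negatives among the taken left items, kept sorted at all times
--     for l in range(t + 1):
--         if l > 0:
--             sum_l += V[l - 1]
--             if V[l - 1] < 0:
--                 _insort(left, V[l - 1])
--         ms = left[:]
--         sum_r = 0
--         c = min(len(ms), K - l)     # size of the dropped window ms[:c]
--         cur = sum(ms[:c])           # running sum of the c smallest negatives
--         for r in range(t - l + 1):
--             if r > 0:
--                 v = V[N - r]
--                 sum_r += v
--                 if v < 0: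
--                     p = _insort(ms, v)
--                     if p < c:       # v entered the window: window is now one wider
--                         cur += v
--                         c += 1
--             goal = min(len(ms), K - l - r)
--             while c > goal:
--                 c -= 1
--                 cur -= ms[c]
--             while c < goal:
--                 cur += ms[c]
--                 c += 1
--             best = max(best, sum_l + sum_r - cur)
--     return best
-- ===== Notes on version B (the rewrite author's own statement) =====
-- stated objective: faster
-- what changed: Instead of copying and re-sorting the negatives list and re-summing its prefix slice at every inner iteration, B keeps the negatives sorted at all times via hand-written binary insertion and maintains the dropped window's sum incrementally (adjusting it by single elements as the window bound moves), folding A's redundant left-only maximum check into the r=0 iteration; intended as faster (per-iteration sort+sum removed), measured 3.4-4.7x at n=4096 in a timing run (both still have a Theta(K^2) iteration floor, so neither finishes n=16384 in that run's timeout).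
import Mathlib
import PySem

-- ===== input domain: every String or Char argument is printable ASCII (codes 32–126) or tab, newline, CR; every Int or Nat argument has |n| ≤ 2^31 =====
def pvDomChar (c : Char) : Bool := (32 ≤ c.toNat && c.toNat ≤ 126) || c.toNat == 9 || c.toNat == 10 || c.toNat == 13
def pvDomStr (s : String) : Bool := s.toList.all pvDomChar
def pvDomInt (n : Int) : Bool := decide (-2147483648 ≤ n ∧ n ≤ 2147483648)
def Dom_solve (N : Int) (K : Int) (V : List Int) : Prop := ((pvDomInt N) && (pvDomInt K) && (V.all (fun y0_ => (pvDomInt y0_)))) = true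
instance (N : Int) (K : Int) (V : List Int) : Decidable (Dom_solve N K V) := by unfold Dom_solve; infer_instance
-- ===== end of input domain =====

-- B replaces A's per-iteration copy-and-re-sort of the negatives and re-summation of its prefix by an
-- incrementally maintained sorted list (binary insertion) with a running window sum (objective: faster;
-- intended as faster, a timing run measured 3.4-4.7x at n=4096).

-- ===== PORT A =====
-- shared tail of A's inner loop body (ci / acc_c / acc / ret update)
def innerTailA (K li acc_l : Int) (acc_r : Int) (ms : List Int) (ret : Int) (x : Int) : Int × List Int × Int :=
  let ci := min ((ms.length : Int)) (K - li - x)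
  let acc_c := (PySem.List.slice ms none (some ci)).sum
  let acc := acc_l + acc_r - acc_c
  (acc_r, ms, if ret < acc then acc else ret)

def stepInnerA (N K li acc_l : Int) (V : List Int) (st : Int × List Int × Int) (x : Int) : Int × List Int × Int :=
  if 0 < x then
    let v := PySem.List.pyGetD V (N - x) 0
    innerTailA K li acc_l (st.1 + v)
      (if v < 0 then PySem.List.sorted (st.2.1 ++ [v]) (fun y => y) false else st.2.1) st.2.2 x
  else innerTailA K li acc_l st.1 st.2.1 st.2.2 x

-- shared tail of A's outer loop body (ret check, copy-sort of acc_ml, inner loop)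
def outerTailA (N K : Int) (V : List Int) (acc_l : Int) (acc_ml : List Int) (ret : Int) (li : Int) : Int × List Int × Int :=
  let ret1 := if ret < acc_l then acc_l else ret
  let ms := PySem.List.sorted acc_ml (fun y => y) false
  let inner := (PySem.List.pyRange 0 (min (N+1) (K+1) - li) 1).foldl (stepInnerA N K li acc_l V) (0, ms, ret1)
  (acc_l, acc_ml, inner.2.2)

def stepOuterA (N K : Int) (V : List Int) (st : Int × List Int × Int) (li : Int) : Int × List Int × Int :=
  if 0 < li then
    let v := PySem.List.pyGetD V (li - 1) 0
    outerTailA N K V (st.1 + v) (if v < 0 then st.2.1 ++ [v] else st.2.1) st.2.2 li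
  else outerTailA N K V st.1 st.2.1 st.2.2 li

def solve (N : Int) (K : Int) (V : List Int) : Int :=
  ((PySem.List.pyRange 0 (min (N+1) (K+1)) 1).foldl (stepOuterA N K V) (0, ([], 0))).2.2

-- ===== PORT B =====
-- Source B's `while c > goal: c -= 1; cur -= ms[c]`
def shrinkB (ms : List Int) (goal : Int) (c cur : Int) : Int × Int :=
  if h : goal < c then shrinkB ms goal (c - 1) (cur - PySem.List.pyGetD ms (c - 1) 0) else (c, cur)
  termination_by (c - goal).toNat
  decreasing_by omega

-- Source B's `while c < goal: cur += ms[c]; c += 1`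
def growB (ms : List Int) (goal : Int) (c cur : Int) : Int × Int :=
  if h : c < goal then growB ms goal (c + 1) (cur + PySem.List.pyGetD ms c 0) else (c, cur)
  termination_by (goal - c).toNat
  decreasing_by omega

-- shared tail of B's inner loop body (goal, the two window-adjustment loops, best update)
def innerTailB (K l sum_l : Int) (sum_r : Int) (ms : List Int) (c cur best : Int) (r : Int) :
    Int × List Int × Int × Int × Int :=
  let goal := min ((ms.length : Int)) (K - l - r)
  let sc := shrinkB ms goal c cur
  let gc := growB ms goal sc.1 sc.2
  (sum_r, ms, gc.1, gc.2, max best (sum_l + sum_r - gc.2))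

-- Source B's _insort is Python's bisect_right binary-search loop followed by ms.insert(lo, v)
def stepInnerB (N K l sum_l : Int) (V : List Int) (st : Int × List Int × Int × Int × Int) (r : Int) :
    Int × List Int × Int × Int × Int :=
  if 0 < r then
    let v := PySem.List.pyGetD V (N - r) 0
    if v < 0 then
      let p := PySem.List.bisectRight st.2.1 v
      let ms := PySem.List.insert st.2.1 ((p : Nat) : Int) v
      if (p : Int) < st.2.2.1 then
        innerTailB K l sum_l (st.1 + v) ms (st.2.2.1 + 1) (st.2.2.2.1 + v) st.2.2.2.2 r
      else innerTailB K l sum_l (st.1 + v) ms st.2.2.1 st.2.2.2.1 st.2.2.2.2 r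
    else innerTailB K l sum_l (st.1 + v) st.2.1 st.2.2.1 st.2.2.2.1 st.2.2.2.2 r
  else innerTailB K l sum_l st.1 st.2.1 st.2.2.1 st.2.2.2.1 st.2.2.2.2 r

-- shared tail of B's outer loop body (window initialisation and inner loop)
def outerTailB (N K t : Int) (V : List Int) (sum_l : Int) (left : List Int) (best : Int) (l : Int) :
    Int × List Int × Int :=
  let c := min ((left.length : Int)) (K - l)
  let cur := (PySem.List.slice left none (some c)).sum
  let inner := (PySem.List.pyRange 0 (t - l + 1) 1).foldl (stepInnerB N K l sum_l V) (0, left, c, cur, best)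
  (sum_l, left, inner.2.2.2.2)

def stepOuterB (N K t : Int) (V : List Int) (st : Int × List Int × Int) (l : Int) : Int × List Int × Int :=
  if 0 < l then
    let v := PySem.List.pyGetD V (l - 1) 0
    outerTailB N K t V (st.1 + v)
      (if v < 0 then PySem.List.insert st.2.1 ((PySem.List.bisectRight st.2.1 v : Nat) : Int) v else st.2.1)
      st.2.2 l
  else outerTailB N K t V st.1 st.2.1 st.2.2 l

def solve_alt (N : Int) (K : Int) (V : List Int) : Int :=
  if min N K < 0 then 0
  else ((PySem.List.pyRange 0 (min N K + 1) 1).foldl (stepOuterB N K (min N K) V) (0, ([], 0))).2.2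

-- ===== PRECONDITION & SPEC =====
-- Pre_ holds exactly where every index A touches is in Python range, i.e. exactly where A returns
-- normally; outside it A raises IndexError.
def Pre_solve (N : Int) (K : Int) (V : List Int) : Prop :=
  min N K ≤ 0 ∨ (min N K ≤ (V.length : Int) ∧ N ≤ (V.length : Int) ∧ -(V.length : Int) ≤ N - min N K)
instance (N : Int) (K : Int) (V : List Int) : Decidable (Pre_solve N K V) := by unfold Pre_solve; infer_instance

def pvWitness_solve : Int × Int × List Int := (3, 2, [7, -2, 4])

def Spec_solve (N : Int) (K : Int) (V : List Int) (out : Int) : Prop := out = solve_alt N K V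
instance (N : Int) (K : Int) (V : List Int) (out : Int) : Decidable (Spec_solve N K V out) := by unfold Spec_solve; infer_instance

-- ===== CLAIM (what is proved, stated in full; the proofs are below) =====
def Claim_equal_solve : Prop := ∀ (N : Int) (K : Int) (V : List Int), Dom_solve N K V → Pre_solve N K V → Spec_solve N K V (solve N K V)

-- ===== LEMMAS AND PROOFS =====

-- Python's `ret = acc if ret < acc else ret` is max
lemma ifMax (r a : Int) : (if r < a then a else r) = max r a := by
  split_ifs with h
  · exact (max_eq_right h.le).symm
  · exact (max_eq_left (not_lt.mp h)).symm

lemma sum_nonpos_of_neg (l : List Int) (h : ∀ x ∈ l, x < 0) : l.sum ≤ 0 := by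
  induction l with
  | nil => simp
  | cons x xs ih =>
    simp only [List.sum_cons]
    have hx := h x (by simp)
    have := ih (fun y hy => h y (by simp [hy]))
    omega

-- ms.insert(p, v) at a position 0 ≤ p ≤ len splices v in
lemma insert_take_drop (xs : List Int) (p : Nat) (h : p ≤ xs.length) (v : Int) :
    PySem.List.insert xs ((p : Nat) : Int) v = xs.take p ++ v :: xs.drop p := by
  simp [PySem.List.insert, PySem.List.sliceIndices]
  have h0 : ¬ ((p : Int) < 0) := by omega
  rw [if_neg h0]
  have he : (min (p : Int) (xs.length : Int)).toNat = p := by omega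
  rw [he]

-- inserting at the bisect_right position of a sorted list is sorting the appended list
lemma sorted_append_eq_splice (m : List Int) (v : Int) (hm : m.Pairwise (· ≤ ·)) :
    PySem.List.sorted (m ++ [v]) (fun y => y) false =
      m.take (PySem.List.bisectRight m v) ++ v :: m.drop (PySem.List.bisectRight m v) := by
  obtain ⟨hple, hub, hlb⟩ := PySem.List.bisectRight_spec m v hm
  set p := PySem.List.bisectRight m v with hp
  apply PySem.List.sorted_id_eq_of_perm_of_pairwise
  · have h1 : (m.take p ++ v :: m.drop p).Perm (v :: m) := by
      have h2 := (List.perm_middle (a := v) (l₁ := m.take p) (l₂ := m.drop p))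
      rwa [List.take_append_drop] at h2
    exact h1.trans (List.perm_append_singleton v m).symm
  · rw [List.pairwise_append]
    refine ⟨hm.sublist (List.take_sublist _ _), ?_, ?_⟩
    · rw [List.pairwise_cons]
      refine ⟨?_, hm.sublist (List.drop_sublist _ _)⟩
      intro b hb
      obtain ⟨j, hj, rfl⟩ := List.mem_drop_iff_getElem.mp hb
      exact (hlb (p + j) (by omega) (by omega)).le
    · intro a ha b hb
      obtain ⟨i, hi, rfl⟩ := List.mem_take_iff_getElem.mp ha
      have hav : m[i]'(by omega) ≤ v := hub i (by omega) (by omega)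
      rcases List.mem_cons.mp hb with rfl | hb'
      · exact hav
      · obtain ⟨j, hj, rfl⟩ := List.mem_drop_iff_getElem.mp hb'
        exact hav.trans (hlb (p + j) (by omega) (by omega)).le

-- the window invariant carried through B's inner loop
def InvB (m : List Int) (c cur : Int) : Prop :=
  0 ≤ c ∧ c ≤ (m.length : Int) ∧ cur = (m.take c.toNat).sum

lemma shrink_spec (m : List Int) (goal : Int) :
    ∀ n : Nat, ∀ c : Int, (c - goal).toNat = n → 0 ≤ goal → goal ≤ c → c ≤ (m.length : Int) →
      shrinkB m goal c ((m.take c.toNat).sum) = (goal, (m.take goal.toNat).sum) := by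
  intro n
  induction n with
  | zero =>
    intro c hn h0 h1 h2
    have : c = goal := by omega
    subst this
    rw [shrinkB, dif_neg (by omega)]
  | succ k ih =>
    intro c hn h0 h1 h2
    have hlt : goal < c := by omega
    rw [shrinkB, dif_pos hlt]
    have hidx : (c - 1).toNat < m.length := by omega
    have hget : PySem.List.pyGetD m (c - 1) 0 = m[(c-1).toNat] :=
      PySem.List.pyGetD_eq_getElem m 0 (by omega) (by omega)
    have hsum : (m.take c.toNat).sum = (m.take (c-1).toNat).sum + m[(c-1).toNat] := by
      have hcn : c.toNat = (c-1).toNat + 1 := by omega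
      rw [hcn, List.sum_take_succ m ((c-1).toNat) hidx]
    rw [hget]
    have harg : (m.take c.toNat).sum - m[(c-1).toNat] = (m.take (c-1).toNat).sum := by omega
    rw [harg]
    exact ih (c - 1) (by omega) h0 (by omega) (by omega)

lemma grow_spec (m : List Int) (goal : Int) :
    ∀ n : Nat, ∀ c : Int, (goal - c).toNat = n → 0 ≤ c → c ≤ goal → goal ≤ (m.length : Int) →
      growB m goal c ((m.take c.toNat).sum) = (goal, (m.take goal.toNat).sum) := by
  intro n
  induction n with
  | zero =>
    intro c hn h0 h1 h2
    have : c = goal := by omega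
    subst this
    rw [growB, dif_neg (by omega)]
  | succ k ih =>
    intro c hn h0 h1 h2
    have hlt : c < goal := by omega
    rw [growB, dif_pos hlt]
    have hidx : c.toNat < m.length := by omega
    have hget : PySem.List.pyGetD m c 0 = m[c.toNat] :=
      PySem.List.pyGetD_eq_getElem m 0 (by omega) (by omega)
    have hsum : (m.take (c+1).toNat).sum = (m.take c.toNat).sum + m[c.toNat] := by
      have hcn : (c+1).toNat = c.toNat + 1 := by omega
      rw [hcn, List.sum_take_succ m c.toNat hidx]
    rw [hget, ← hsum]
    exact ih (c + 1) (by omega) (by omega) (by omega) (by omega)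

-- the two adjustment loops in sequence bring the window to `goal`
lemma adjust_spec (m : List Int) (goal c cur : Int) (hg0 : 0 ≤ goal) (hgl : goal ≤ (m.length : Int))
    (hinv : InvB m c cur) :
    growB m goal (shrinkB m goal c cur).1 (shrinkB m goal c cur).2 = (goal, (m.take goal.toNat).sum) := by
  obtain ⟨h0, h1, rfl⟩ := hinv
  rcases le_total goal c with hle | hge
  · rw [shrink_spec m goal _ c rfl hg0 hle h1]
    rw [growB, dif_neg (by omega)]
  · rw [shrinkB, dif_neg (by omega)]
    exact grow_spec m goal _ c rfl h0 hge hgl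

lemma take_insert_of_le (m : List Int) (v : Int) (p c : Nat) (hp : p ≤ m.length) (hc : c ≤ p) :
    (m.take p ++ v :: m.drop p).take c = m.take c := by
  rw [List.take_append_of_le_length (by rw [List.length_take]; omega), List.take_take,
    Nat.min_eq_left hc]

lemma sum_take_insert_of_lt (m : List Int) (v : Int) (p c : Nat) (hp : p ≤ m.length) (hpc : p < c) :
    ((m.take p ++ v :: m.drop p).take (c+1)).sum = v + (m.take c).sum := by
  rw [List.take_append, List.take_take]
  have h1 : min (c+1) p = p := by omega
  rw [h1, List.length_take]
  have h2 : c + 1 - min p m.length = (c - p) + 1 := by omega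
  rw [h2, List.take_succ_cons, List.sum_append, List.sum_cons]
  have h3 : m.take c = m.take p ++ (m.drop p).take (c - p) := by
    have h4 : c = p + (c - p) := by omega
    rw [h4, List.take_add]
    congr 2
    omega
  rw [h3, List.sum_append]
  ring

-- the common tail: B's adjusted window is exactly A's ci / acc_c, and both do the same max update
lemma tail_eq (K l sum_l sum_r c cur ret : Int) (m : List Int) (x : Int)
    (hx : 0 ≤ K - l - x) (hinv : InvB m c cur) :
    innerTailA K l sum_l sum_r m ret x =
      (sum_r, m, max ret (sum_l + sum_r - (m.take (min ((m.length : Int)) (K - l - x)).toNat).sum)) ∧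
    innerTailB K l sum_l sum_r m c cur ret x =
      (sum_r, m, min ((m.length : Int)) (K - l - x),
        (m.take (min ((m.length : Int)) (K - l - x)).toNat).sum,
        max ret (sum_l + sum_r - (m.take (min ((m.length : Int)) (K - l - x)).toNat).sum)) := by
  have hg0 : 0 ≤ min ((m.length : Int)) (K - l - x) := by
    have h5 : (0:Int) ≤ (m.length : Int) := by positivity
    omega
  constructor
  · simp only [innerTailA]
    rw [PySem.List.slice_to m hg0, ifMax]
  · simp only [innerTailB]
    rw [adjust_spec m _ c cur hg0 (by omega) hinv]

-- one inner step: A's state is the projection of B's, and the invariants are preserved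
lemma innerStep_eq (N K l sum_l : Int) (V : List Int) (x a r c cur : Int) (m : List Int)
    (hx : 0 ≤ K - l - x) (hm : m.Pairwise (· ≤ ·)) (hneg : ∀ y ∈ m, y < 0) (hinv : InvB m c cur) :
    stepInnerA N K l sum_l V (a, m, r) x =
      ((stepInnerB N K l sum_l V (a, m, c, cur, r) x).1,
       (stepInnerB N K l sum_l V (a, m, c, cur, r) x).2.1,
       (stepInnerB N K l sum_l V (a, m, c, cur, r) x).2.2.2.2) ∧
    (stepInnerB N K l sum_l V (a, m, c, cur, r) x).2.1.Pairwise (· ≤ ·) ∧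
    (∀ y ∈ (stepInnerB N K l sum_l V (a, m, c, cur, r) x).2.1, y < 0) ∧
    InvB (stepInnerB N K l sum_l V (a, m, c, cur, r) x).2.1
      (stepInnerB N K l sum_l V (a, m, c, cur, r) x).2.2.1
      (stepInnerB N K l sum_l V (a, m, c, cur, r) x).2.2.2.1 := by
  obtain ⟨hc0, hcl, hcur⟩ := hinv
  by_cases hx0 : 0 < x
  · simp only [stepInnerA, stepInnerB, if_pos hx0]
    set v := PySem.List.pyGetD V (N - x) 0 with hv
    by_cases hvn : v < 0
    · simp only [if_pos hvn]
      obtain ⟨hple, -, -⟩ := PySem.List.bisectRight_spec m v hm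
      set p := PySem.List.bisectRight m v with hpdef
      have hins : PySem.List.insert m ((p : Nat) : Int) v = m.take p ++ v :: m.drop p :=
        insert_take_drop m p hple v
      have hsplice : PySem.List.sorted (m ++ [v]) (fun y => y) false = m.take p ++ v :: m.drop p :=
        sorted_append_eq_splice m v hm
      set m' := m.take p ++ v :: m.drop p with hm'
      have hpair' : m'.Pairwise (· ≤ ·) := by
        rw [← hsplice]; exact PySem.List.sorted_pairwise (m ++ [v]) (fun y => y)
      have hneg' : ∀ y ∈ m', y < 0 := by
        intro y hy
        rw [← hsplice, PySem.List.mem_sorted] at hy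
        rcases List.mem_append.mp hy with h | h
        · exact hneg y h
        · simp at h; omega
      have hlen' : (m'.length : Int) = (m.length : Int) + 1 := by
        rw [hm']; simp
      rw [hsplice, hins]
      by_cases hpc : (p : Int) < c
      · simp only [if_pos hpc]
        have hinv' : InvB m' (c + 1) (cur + v) := by
          refine ⟨by omega, by omega, ?_⟩
          have hcn : (c+1).toNat = c.toNat + 1 := by omega
          rw [hcn, sum_take_insert_of_lt m v p c.toNat hple (by omega)]
          omega
        obtain ⟨hA, hB⟩ := tail_eq K l sum_l (a + v) (c+1) (cur+v) r m' x hx hinv'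
        rw [hA, hB]
        have hg0 : 0 ≤ min ((m'.length : Int)) (K - l - x) := by omega
        exact ⟨rfl, hpair', hneg', by dsimp only; omega, by dsimp only; omega, rfl⟩
      · simp only [if_neg hpc]
        have hinv' : InvB m' c cur := by
          refine ⟨hc0, by omega, ?_⟩
          rw [take_insert_of_le m v p c.toNat hple (by omega), hcur]
        obtain ⟨hA, hB⟩ := tail_eq K l sum_l (a + v) c cur r m' x hx hinv'
        rw [hA, hB]
        exact ⟨rfl, hpair', hneg', by dsimp only; omega, by dsimp only; omega, rfl⟩
    · simp only [if_neg hvn]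
      obtain ⟨hA, hB⟩ := tail_eq K l sum_l (a + v) c cur r m x hx ⟨hc0, hcl, hcur⟩
      rw [hA, hB]
      exact ⟨rfl, hm, hneg, by dsimp only; omega, by dsimp only; omega, rfl⟩
  · simp only [stepInnerA, stepInnerB, if_neg hx0]
    obtain ⟨hA, hB⟩ := tail_eq K l sum_l a c cur r m x hx ⟨hc0, hcl, hcur⟩
    rw [hA, hB]
    exact ⟨rfl, hm, hneg, by dsimp only; omega, by dsimp only; omega, rfl⟩

-- the inner folds agree from matching states
lemma innerFold_eq (N K l sum_l : Int) (V : List Int) :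
    ∀ (L : List Int), (∀ x ∈ L, 0 ≤ K - l - x) →
    ∀ (a r c cur : Int) (m : List Int), m.Pairwise (· ≤ ·) → (∀ y ∈ m, y < 0) → InvB m c cur →
      (L.foldl (stepInnerA N K l sum_l V) (a, m, r)) =
        ((L.foldl (stepInnerB N K l sum_l V) (a, m, c, cur, r)).1,
         (L.foldl (stepInnerB N K l sum_l V) (a, m, c, cur, r)).2.1,
         (L.foldl (stepInnerB N K l sum_l V) (a, m, c, cur, r)).2.2.2.2) := by
  intro L
  induction L with
  | nil => intro _ a r c cur m _ _ _; rfl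
  | cons x xs ih =>
    intro hL a r c cur m hm hneg hinv
    obtain ⟨hstep, hp, hn, hi⟩ := innerStep_eq N K l sum_l V x a r c cur m (hL x (by simp)) hm hneg hinv
    simp only [List.foldl_cons]
    rw [hstep]
    exact ih (fun y hy => hL y (by simp [hy])) _ _ _ _ _ hp hn hi

-- the whole inner loop: A starts from ret ⊔ sum_l, B from ret; they land on the same result
lemma inner_eq (N K l sum_l ret : Int) (V : List Int) (m : List Int) (tl : Int)
    (h0 : 0 ≤ tl) (hKl : tl ≤ K - l) (hm : m.Pairwise (· ≤ ·)) (hneg : ∀ y ∈ m, y < 0) :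
    ((PySem.List.pyRange 0 (tl + 1) 1).foldl (stepInnerA N K l sum_l V)
        (0, m, if ret < sum_l then sum_l else ret)).2.2 =
      ((PySem.List.pyRange 0 (tl + 1) 1).foldl (stepInnerB N K l sum_l V)
        (0, m, min ((m.length : Int)) (K - l),
          (PySem.List.slice m none (some (min ((m.length : Int)) (K - l)))).sum, ret)).2.2.2.2 := by
  have hc0 : (0:Int) ≤ min ((m.length : Int)) (K - l) := by
    have : (0:Int) ≤ (m.length : Int) := by positivity
    omega
  have hcur0 : (PySem.List.slice m none (some (min ((m.length : Int)) (K - l)))).sum =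
      (m.take (min ((m.length : Int)) (K - l)).toNat).sum := by
    rw [PySem.List.slice_to m hc0]
  have hinv0 : InvB m (min ((m.length : Int)) (K - l))
      ((PySem.List.slice m none (some (min ((m.length : Int)) (K - l)))).sum) := by
    exact ⟨hc0, by omega, hcur0⟩
  have hrange : PySem.List.pyRange 0 (tl + 1) 1 = 0 :: PySem.List.pyRange 1 (tl + 1) 1 :=
    PySem.List.pyRange_one_cons (by omega)
  rw [hrange]
  simp only [List.foldl_cons]
  -- the first step (x = 0)
  obtain ⟨hA0, hB0⟩ := tail_eq K l sum_l 0 (min ((m.length : Int)) (K - l))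
    ((PySem.List.slice m none (some (min ((m.length : Int)) (K - l)))).sum)
    (if ret < sum_l then sum_l else ret) m 0 (by omega) hinv0
  obtain ⟨hA0', hB0'⟩ := tail_eq K l sum_l 0 (min ((m.length : Int)) (K - l))
    ((PySem.List.slice m none (some (min ((m.length : Int)) (K - l)))).sum) ret m 0 (by omega) hinv0
  have hsA : stepInnerA N K l sum_l V (0, m, if ret < sum_l then sum_l else ret) 0 =
      (0, m, max ret (sum_l + 0 - (m.take (min ((m.length : Int)) (K - l - 0)).toNat).sum)) := by
    simp only [stepInnerA, if_neg (by omega : ¬ (0:Int) < 0)]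
    rw [hA0, ifMax]
    have hS : (m.take (min ((m.length : Int)) (K - l - 0)).toNat).sum ≤ 0 :=
      sum_nonpos_of_neg _ (fun y hy => hneg y (List.mem_of_mem_take hy))
    have h8 : max (max ret sum_l) (sum_l + 0 - (m.take (min ((m.length : Int)) (K - l - 0)).toNat).sum)
        = max ret (sum_l + 0 - (m.take (min ((m.length : Int)) (K - l - 0)).toNat).sum) := by omega
    rw [h8]
  have hsB : stepInnerB N K l sum_l V (0, m, min ((m.length : Int)) (K - l),
      (PySem.List.slice m none (some (min ((m.length : Int)) (K - l)))).sum, ret) 0 =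
      (0, m, min ((m.length : Int)) (K - l - 0),
        (m.take (min ((m.length : Int)) (K - l - 0)).toNat).sum,
        max ret (sum_l + 0 - (m.take (min ((m.length : Int)) (K - l - 0)).toNat).sum)) := by
    simp only [stepInnerB, if_neg (by omega : ¬ (0:Int) < 0)]
    rw [hB0']
  rw [hsA, hsB]
  have hfold := innerFold_eq N K l sum_l V (PySem.List.pyRange 1 (tl + 1) 1)
    (fun y hy => by rw [PySem.List.mem_pyRange_one] at hy; omega)
    0 (max ret (sum_l + 0 - (m.take (min ((m.length : Int)) (K - l - 0)).toNat).sum))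
    (min ((m.length : Int)) (K - l - 0)) ((m.take (min ((m.length : Int)) (K - l - 0)).toNat).sum)
    m hm hneg ⟨by omega, by omega, rfl⟩
  rw [hfold]

-- the outer folds agree
lemma outerFold_eq (N K t : Int) (V : List Int) (ht : t = min N K) (ht0 : 0 ≤ t) :
    ∀ (L : List Int), (∀ x ∈ L, 0 ≤ x ∧ x ≤ t) →
    ∀ (a r : Int) (ml : List Int), (∀ y ∈ ml, y < 0) →
      (L.foldl (stepOuterA N K V) (a, ml, r)).1 = (L.foldl (stepOuterB N K t V) (a, PySem.List.sorted ml (fun y => y) false, r)).1 ∧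
      (L.foldl (stepOuterB N K t V) (a, PySem.List.sorted ml (fun y => y) false, r)).2.1 =
        PySem.List.sorted (L.foldl (stepOuterA N K V) (a, ml, r)).2.1 (fun y => y) false ∧
      (L.foldl (stepOuterA N K V) (a, ml, r)).2.2 = (L.foldl (stepOuterB N K t V) (a, PySem.List.sorted ml (fun y => y) false, r)).2.2 ∧
      (∀ y ∈ (L.foldl (stepOuterA N K V) (a, ml, r)).2.1, y < 0) := by
  intro L
  induction L with
  | nil => intro _ a r ml hneg; exact ⟨rfl, rfl, rfl, hneg⟩
  | cons x xs ih =>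
    intro hL a r ml hneg
    simp only [List.foldl_cons]
    -- relate the two step results
    have hx := hL x (by simp)
    have hmin : min (N+1) (K+1) - x = (t - x) + 1 := by
      have := Int.min_add_right N K 1
      omega
    -- the updated pair (a', ml') on A's side and left' on B's side
    have key : ∀ (a' : Int) (ml' : List Int), (∀ y ∈ ml', y < 0) →
        stepOuterA N K V (a, ml, r) x = outerTailA N K V a' ml' r x →
        stepOuterB N K t V (a, PySem.List.sorted ml (fun y => y) false, r) x =
          outerTailB N K t V a' (PySem.List.sorted ml' (fun y => y) false) r x →
        (xs.foldl (stepOuterA N K V) (stepOuterA N K V (a, ml, r) x)).1 =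
          (xs.foldl (stepOuterB N K t V) (stepOuterB N K t V (a, PySem.List.sorted ml (fun y => y) false, r) x)).1 ∧
        (xs.foldl (stepOuterB N K t V) (stepOuterB N K t V (a, PySem.List.sorted ml (fun y => y) false, r) x)).2.1 =
          PySem.List.sorted (xs.foldl (stepOuterA N K V) (stepOuterA N K V (a, ml, r) x)).2.1 (fun y => y) false ∧
        (xs.foldl (stepOuterA N K V) (stepOuterA N K V (a, ml, r) x)).2.2 =
          (xs.foldl (stepOuterB N K t V) (stepOuterB N K t V (a, PySem.List.sorted ml (fun y => y) false, r) x)).2.2 ∧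
        (∀ y ∈ (xs.foldl (stepOuterA N K V) (stepOuterA N K V (a, ml, r) x)).2.1, y < 0) := by
      intro a' ml' hneg' hsa hsb
      rw [hsa, hsb]
      -- the two tails agree up to the inner loops
      have hinner := inner_eq N K x a' r V (PySem.List.sorted ml' (fun y => y) false) (t - x)
        (by omega) (by omega)
        (PySem.List.sorted_pairwise ml' (fun y => y))
        (fun y hy => hneg' y ((PySem.List.mem_sorted ml' (fun y => y) false y).mp hy))
      have htailA : outerTailA N K V a' ml' r x =
          (a', ml', ((PySem.List.pyRange 0 ((t - x) + 1) 1).foldl (stepInnerA N K x a' V)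
            (0, PySem.List.sorted ml' (fun y => y) false, if r < a' then a' else r)).2.2) := by
        simp only [outerTailA]
        rw [hmin]
      have htailB : outerTailB N K t V a' (PySem.List.sorted ml' (fun y => y) false) r x =
          (a', PySem.List.sorted ml' (fun y => y) false,
            ((PySem.List.pyRange 0 ((t - x) + 1) 1).foldl (stepInnerB N K x a' V)
              (0, PySem.List.sorted ml' (fun y => y) false,
                min (((PySem.List.sorted ml' (fun y => y) false).length : Int)) (K - x),
                (PySem.List.slice (PySem.List.sorted ml' (fun y => y) false) none
                  (some (min (((PySem.List.sorted ml' (fun y => y) false).length : Int)) (K - x)))).sum,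
                r)).2.2.2.2) := rfl
      rw [htailA, htailB]
      have := ih (fun y hy => hL y (by simp [hy])) a' (((PySem.List.pyRange 0 ((t - x) + 1) 1).foldl (stepInnerA N K x a' V)
            (0, PySem.List.sorted ml' (fun y => y) false, if r < a' then a' else r)).2.2) ml' hneg'
      rw [← hinner]
      exact this
    by_cases h0x : 0 < x
    · set v := PySem.List.pyGetD V (x - 1) 0 with hvd
      by_cases hvn : v < 0
      · -- v is appended on A's side, binary-inserted on B's side
        have hsorted : PySem.List.sorted ml (fun y => y) false |>.Pairwise (· ≤ ·) :=
          PySem.List.sorted_pairwise ml (fun y => y)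
        obtain ⟨hple, -, -⟩ := PySem.List.bisectRight_spec (PySem.List.sorted ml (fun y => y) false) v hsorted
        have hins := insert_take_drop (PySem.List.sorted ml (fun y => y) false)
          (PySem.List.bisectRight (PySem.List.sorted ml (fun y => y) false) v) hple v
        have hsplice := sorted_append_eq_splice (PySem.List.sorted ml (fun y => y) false) v hsorted
        have hperm : (PySem.List.sorted ml (fun y => y) false ++ [v]).Perm (ml ++ [v]) :=
          (PySem.List.sorted_perm ml (fun y => y) false).append_right [v]
        have hresort : PySem.List.sorted (PySem.List.sorted ml (fun y => y) false ++ [v]) (fun y => y) false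
            = PySem.List.sorted (ml ++ [v]) (fun y => y) false :=
          PySem.List.sorted_eq_sorted_of_perm _ _ (fun y => y) (fun _ _ h => h) hperm
        have hleft : PySem.List.insert (PySem.List.sorted ml (fun y => y) false)
            ((PySem.List.bisectRight (PySem.List.sorted ml (fun y => y) false) v : Nat) : Int) v =
            PySem.List.sorted (ml ++ [v]) (fun y => y) false := by
          rw [hins, ← hsplice, hresort]
        have hnegapp : ∀ y ∈ ml ++ [v], y < 0 := by
          intro y hy
          rcases List.mem_append.mp hy with h | h
          · exact hneg y h
          · simp at h; omega
        refine key (a + v) (ml ++ [v]) hnegapp ?_ ?_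
        · simp only [stepOuterA, if_pos h0x, ← hvd, if_pos hvn]
        · simp only [stepOuterB, if_pos h0x, ← hvd, if_pos hvn]
          rw [hleft]
      · refine key (a + v) ml hneg ?_ ?_
        · simp only [stepOuterA, if_pos h0x, ← hvd, if_neg hvn]
        · simp only [stepOuterB, if_pos h0x, ← hvd, if_neg hvn]
    · refine key a ml hneg ?_ ?_
      · simp only [stepOuterA, if_neg h0x]
      · simp only [stepOuterB, if_neg h0x]

-- ===== VERDICT (by name: the statement is the Claim_ definition above) =====
theorem solve_spec : Claim_equal_solve := by
  intro N K V hdom hpre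
  unfold Spec_solve solve solve_alt
  have hmin : min (N+1) (K+1) = min N K + 1 := Int.min_add_right N K 1
  by_cases ht : min N K < 0
  · rw [if_pos ht, hmin, PySem.List.pyRange_one_eq_nil (by omega)]
    rfl
  · rw [if_neg ht, hmin]
    obtain ⟨-, -, h3, -⟩ := outerFold_eq N K (min N K) V rfl (by omega)
      (PySem.List.pyRange 0 (min N K + 1) 1)
      (fun x hx => by rw [PySem.List.mem_pyRange_one] at hx; omega)
      0 0 [] (by simp)
    simpa using h3
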